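-- pv_equiv track=rewrite | github.com/aladinez/Computor-v1 | Computor.py | combine_terms
-- ===== SOURCE A (Python) =====
-- def combine_terms(terms):
--     combined_terms = {}
--     for coef, power in terms:
--         if power in combined_terms:
--             combined_terms[power] += coef
--         else:
--             combined_terms[power] = coef
--     return combined_terms
-- ===== SOURCE B (Python) =====
-- def combine_terms(terms):
--     # Two-phase: list the distinct powers in first-appearance order, then
--     # compute each combined coefficient with an independent summing pass.
--     powers = list(dict.fromkeys(power for _, power in terms))
--     return {p: sum(coef for coef, q in terms if q == p) for p in powers}
-- ===== Notes on version B (the rewrite author's own statement) =====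
-- stated objective: alternative
-- what changed: Replaces A's single-pass in-place dict accumulation with a two-phase pass: first dedup the powers in first-appearance order, then build the result dict by summing, per power, the matching coefficients with a comprehension.
import Mathlib
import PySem

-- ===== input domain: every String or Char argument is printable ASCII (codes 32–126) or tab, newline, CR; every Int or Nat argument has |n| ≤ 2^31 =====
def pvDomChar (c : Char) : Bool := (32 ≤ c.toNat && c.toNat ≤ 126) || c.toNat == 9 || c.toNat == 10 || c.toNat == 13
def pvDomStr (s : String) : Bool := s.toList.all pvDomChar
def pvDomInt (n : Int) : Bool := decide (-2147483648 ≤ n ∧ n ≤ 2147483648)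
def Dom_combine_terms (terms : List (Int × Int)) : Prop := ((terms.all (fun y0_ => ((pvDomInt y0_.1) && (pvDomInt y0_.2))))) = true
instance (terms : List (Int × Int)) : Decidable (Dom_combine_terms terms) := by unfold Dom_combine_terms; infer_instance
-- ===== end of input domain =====

-- B computes the same combined-terms dict via dedup-of-powers + per-power summation instead of in-place dict accumulation (alternative decomposition, same result).


-- ===== PORT A =====
-- 'combined_terms = {}; for coef, power in terms: if power in …: += coef else: = coef'
def combine_terms (terms : List (Int × Int)) : List (Int × Int) :=
  (terms.foldl
    (fun d t =>
      if d.contains t.2 then d.insert t.2 (d.getD t.2 0 + t.1)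
      else d.insert t.2 t.1)
    (PySem.Dict.empty : PySem.Dict Int Int)).items

-- ===== PORT B =====
-- 'powers = list(dict.fromkeys(power for _, power in terms))'
-- 'return {p: sum(coef for coef, q in terms if q == p) for p in powers}'
def combine_terms_alt (terms : List (Int × Int)) : List (Int × Int) :=
  (PySem.List.dedup (terms.map (·.2))).map
    (fun p => (p, terms.foldl (fun s t => if t.2 == p then s + t.1 else s) 0))

-- ===== PRECONDITION & SPEC =====
def Spec_combine_terms (terms : List (Int × Int)) (out : List (Int × Int)) : Prop := out = combine_terms_alt terms
instance (terms : List (Int × Int)) (out : List (Int × Int)) : Decidable (Spec_combine_terms terms out) := by unfold Spec_combine_terms; infer_instance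

-- ===== CLAIM (what is proved, stated in full; the proofs are below) =====
def Claim_equal_combine_terms : Prop := ∀ (terms : List (Int × Int)), Dom_combine_terms terms → Spec_combine_terms terms (combine_terms terms)

-- ===== LEMMAS AND PROOFS =====

-- A's loop body always equals the unconditional 'd[power] = d.get(power, 0) + coef' step.
theorem stepA_eq (d : PySem.Dict Int Int) (t : Int × Int) :
    (if d.contains t.2 then d.insert t.2 (d.getD t.2 0 + t.1) else d.insert t.2 t.1)
      = d.insert t.2 (d.getD t.2 0 + t.1) := by
  by_cases h : d.contains t.2
  · simp [h]
  · simp only [Bool.not_eq_true] at h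
    have h0 : d.getD t.2 0 = 0 := PySem.Dict.getD_of_not_contains _ _ h
    simp [h, h0]

-- The accumulated value at any key p is the starting value plus the sum of matching coefficients.
theorem getD_foldl_insert_add (l : List (Int × Int)) (d : PySem.Dict Int Int) (p : Int) :
    (l.foldl (fun d t => d.insert t.2 (d.getD t.2 0 + t.1)) d).getD p 0
      = d.getD p 0 + ((l.filter (fun t => t.2 == p)).map (·.1)).sum := by
  induction l generalizing d with
  | nil => simp
  | cons t l ih =>
    simp only [List.foldl_cons, ih, List.filter_cons]
    by_cases h : t.2 = p
    · simp [h]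
      ring
    · rw [PySem.Dict.getD_insert, if_neg (fun hpt => h hpt.symm)]
      simp [h]

theorem combine_terms_eq (terms : List (Int × Int)) :
    combine_terms terms = combine_terms_alt terms := by
  unfold combine_terms combine_terms_alt
  have hbody : (terms.foldl
      (fun d t =>
        if d.contains t.2 then d.insert t.2 (d.getD t.2 0 + t.1)
        else d.insert t.2 t.1)
      (PySem.Dict.empty : PySem.Dict Int Int))
      = terms.foldl (fun d t => d.insert t.2 (d.getD t.2 0 + t.1)) PySem.Dict.empty := by
    apply PySem.List.foldl_congr_mem
    intro d t _
    exact stepA_eq d t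
  rw [hbody]
  set D := terms.foldl (fun d t => d.insert t.2 (d.getD t.2 0 + t.1)) (PySem.Dict.empty : PySem.Dict Int Int) with hD
  have hnd : D.keys.Nodup := by
    rw [hD]
    exact PySem.Dict.nodup_keys_foldl_insert_key terms (·.2) _ _ (by simp)
  have hkeys : D.keys = PySem.List.dedup (terms.map (·.2)) := by
    rw [hD, PySem.Dict.keys_foldl_insert_key]
    simp [PySem.Set.update, PySem.Set.ofList_eq_foldl]
  rw [PySem.Dict.items_eq_map_keys D hnd 0, hkeys]
  apply List.map_congr_left
  intro p _
  rw [hD, getD_foldl_insert_add]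
  rw [PySem.List.foldl_if_eq_foldl_filter, PySem.List.foldl_add]
  simp

-- ===== VERDICT (by name: the statement is the Claim_ definition above) =====
theorem combine_terms_spec : Claim_equal_combine_terms := by
  intro terms _
  exact combine_terms_eq terms
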